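-- pv_equiv track=rewrite | github.com/Nanazuzu/PythonLearn | 2025_04_28/2025_04_28(2).py | smaller_after_reverse
-- ===== SOURCE A (Python) =====
-- def smaller_after_reverse(n: int) -> int:
--   e = 0
--   list_num =[]
--   while(True):
--     if n // (10 ** e) != 0:
--       e += 1
--     else:
--       e -= 1
--       break
--   indi = n
--   for index in range(e, -1, -1):
--     if indi // (10 ** index) == 0:
--       continue
--     num = indi // (10 ** index)
--     list_num.append(num)
--     indi %= 10 ** index
--   revn = 0
--   for ind in range(len(list_num)):
--     revn += list_num[ind] * (10 ** ind)
--   if n < revn: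
--     return n
--   else:
--     return revn
-- ===== SOURCE B (Python) =====
-- def smaller_after_reverse(n: int) -> int:
--     rev = 0
--     m = n
--     while m > 0:
--         d = m % 10
--         m //= 10
--         if d != 0:
--             rev = rev * 10 + d
--     return min(n, rev)
-- ===== Notes on version B (the rewrite author's own statement) =====
-- stated objective: simpler
-- what changed: Replaces A's three passes (a power-of-10 loop measuring the digit count, a most-significant-first scan building a list of nonzero digits, and a resummation with powers of 10) by a single least-significant-first arithmetic pass with a Horner accumulator rev = rev*10 + d that skips zero digits, then min(n, rev); zero digits are dropped exactly as A drops them.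
import Mathlib
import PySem

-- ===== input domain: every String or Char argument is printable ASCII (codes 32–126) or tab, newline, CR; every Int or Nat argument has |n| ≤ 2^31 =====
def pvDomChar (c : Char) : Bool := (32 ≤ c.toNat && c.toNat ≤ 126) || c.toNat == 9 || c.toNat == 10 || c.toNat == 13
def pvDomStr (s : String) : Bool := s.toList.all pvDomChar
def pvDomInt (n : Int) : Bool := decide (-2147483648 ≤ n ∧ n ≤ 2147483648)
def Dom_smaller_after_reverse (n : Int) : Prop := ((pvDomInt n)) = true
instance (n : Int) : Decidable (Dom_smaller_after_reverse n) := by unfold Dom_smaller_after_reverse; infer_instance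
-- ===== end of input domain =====

-- B replaces A's three passes (digit-count loop, most-significant-first nonzero-digit list, power-of-10 resummation)
-- by one least-significant-first Horner pass skipping zero digits; equivalence of return values proved for n ≥ 0.

-- ===== PORT A =====
-- A's `while(True)` digit-count loop; fuel only makes it total (returns after ~log10 n steps for n ≥ 0;
-- for n < 0 the Python loop never terminates, excluded by Pre_).
def pvA_findE (n : Int) : Nat → Nat → Option Int
  | 0, _ => none
  | fuel + 1, e =>
      if PySem.Int.floordiv n (10 ^ e) ≠ 0 then pvA_findE n fuel (e + 1)
      else some ((e : Int) - 1)

-- body of A's `for index in range(e, -1, -1)` loop over state (list_num, indi)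
def pvAStep (st : List Int × Int) (index : Int) : List Int × Int :=
  if PySem.Int.floordiv st.2 (10 ^ index.toNat) = 0 then st
  else (st.1 ++ [PySem.Int.floordiv st.2 (10 ^ index.toNat)], PySem.Int.mod st.2 (10 ^ index.toNat))

def smaller_after_reverse (n : Int) : Int :=
  match pvA_findE n (n.natAbs + 2) 0 with
  | none => 0   -- unreachable for n ≥ 0 (fuel suffices); the Python diverges for n < 0
  | some e =>
      let st := (PySem.List.pyRange e (-1) (-1)).foldl pvAStep ([], n)
      let revn := (PySem.List.pyRange 0 (st.1.length) 1).foldl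
        (fun revn ind => revn + PySem.List.pyGetD st.1 ind 0 * 10 ^ ind.toNat) 0
      if n < revn then n else revn

-- ===== PORT B =====
-- B's `while m > 0` loop; fuel n.natAbs + 1 only makes it total (the loop divides m by 10 each step).
def pvB_rev : Nat → Int → Int → Int
  | 0, _, rev => rev
  | fuel + 1, m, rev =>
      if m > 0 then
        pvB_rev fuel (PySem.Int.floordiv m 10)
          (if PySem.Int.mod m 10 ≠ 0 then rev * 10 + PySem.Int.mod m 10 else rev)
      else rev

def smaller_after_reverse_alt (n : Int) : Int := min n (pvB_rev (n.natAbs + 1) n 0)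

-- ===== PRECONDITION & SPEC =====
-- A's first while-loop never terminates for n < 0 (n // 10**e stays -1); Pre_ admits exactly the inputs A returns on.
def Pre_smaller_after_reverse (n : Int) : Prop := 0 ≤ n
instance (n : Int) : Decidable (Pre_smaller_after_reverse n) := by unfold Pre_smaller_after_reverse; infer_instance
def pvWitness_smaller_after_reverse : Int := (103)

def Spec_smaller_after_reverse (n : Int) (out : Int) : Prop := out = smaller_after_reverse_alt n
instance (n : Int) (out : Int) : Decidable (Spec_smaller_after_reverse n out) := by unfold Spec_smaller_after_reverse; infer_instance

-- ===== CLAIM (what is proved, stated in full; the proofs are below) =====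
def Claim_equal_smaller_after_reverse : Prop := ∀ (n : Int), Dom_smaller_after_reverse n → Pre_smaller_after_reverse n → Spec_smaller_after_reverse n (smaller_after_reverse n)

-- ===== LEMMAS AND PROOFS =====

-- the nonzero decimal digits of n, least significant first
def pvDigits (n : Int) : List Int :=
  if h : n ≤ 0 then []
  else if n % 10 = 0 then pvDigits (n / 10) else n % 10 :: pvDigits (n / 10)
termination_by n.toNat
decreasing_by all_goals omega

theorem pvDigits_nonpos {n : Int} (h : n ≤ 0) : pvDigits n = [] := by
  rw [pvDigits]; simp [h]

theorem pvDigits_pos {n : Int} (h : 0 < n) :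
    pvDigits n = if n % 10 = 0 then pvDigits (n / 10) else n % 10 :: pvDigits (n / 10) := by
  rw [pvDigits]; simp [show ¬ n ≤ 0 by omega]

-- evaluate a digit list (least significant first) at base 10
def pvPoly : List Int → Int
  | [] => 0
  | a :: t => a + 10 * pvPoly t

theorem pvPoly_append (M : List Int) (x : Int) :
    pvPoly (M ++ [x]) = pvPoly M + x * 10 ^ M.length := by
  induction M with
  | nil => simp [pvPoly]
  | cons a t ih => simp [pvPoly, ih]; ring

-- prepending the top digit d at position k appends it to the nonzero-digit list
theorem pvDigits_shift (k : Nat) : ∀ (d m : Int), 1 ≤ d → d ≤ 9 → 0 ≤ m → m < 10 ^ k →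
    pvDigits (d * 10 ^ k + m) = pvDigits m ++ [d] := by
  induction k with
  | zero =>
      intro d m h1 h9 hm hmk
      have hm0 : m = 0 := by omega
      subst hm0
      rw [pvDigits]
      have : ¬ (d * 10 ^ 0 + 0 ≤ 0) := by omega
      simp only [this, dite_false]
      have hmod : (d * 10 ^ 0 + 0) % 10 = d := by omega
      have hdiv : (d * 10 ^ 0 + 0) / 10 = 0 := by omega
      rw [if_neg (by omega), hmod, hdiv, pvDigits_nonpos (le_refl (0:Int))]
      simp
  | succ k ih =>
      intro d m h1 h9 hm hmk
      have hP : (0:Int) < 10 ^ k := by positivity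
      have hpow : (10:Int) ^ (k+1) = 10 * 10 ^ k := by ring
      set n := d * 10 ^ (k+1) + m with hn
      have hnpos : 0 < n := by nlinarith
      have hmod : n % 10 = m % 10 := by
        have : n = 10 * (d * 10 ^ k) + m := by rw [hn, hpow]; ring
        omega
      have hdiv : n / 10 = d * 10 ^ k + m / 10 := by
        have : n = 10 * (d * 10 ^ k) + m := by rw [hn, hpow]; ring
        omega
      have hmk' : m / 10 < 10 ^ k := by
        have : m < 10 * 10 ^ k := by rw [← hpow]; exact hmk
        omega
      have ih' := ih d (m / 10) h1 h9 (by omega) hmk'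
      rw [pvDigits]
      simp only [show ¬ (n ≤ 0) by omega, dite_false]
      rw [hmod, hdiv, ih']
      by_cases hm0 : m ≤ 0
      · have : m = 0 := by omega
        subst this
        norm_num
      · rw [pvDigits_pos (n := m) (by omega)]
        by_cases hr : m % 10 = 0
        · simp [hr]
        · simp [hr]

-- A's extraction loop collects exactly the nonzero digits, most significant first
theorem pvAfold (k : Nat) : ∀ (L : List Int) (m : Int), 0 ≤ m → m < 10 ^ (k + 1) →
    (((PySem.List.pyRange (k : Int) (-1) (-1)).foldl pvAStep (L, m)).1 : List Int)
      = L ++ (pvDigits m).reverse := by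
  induction k with
  | zero =>
      intro L m hm hmk
      simp only [Nat.cast_zero]
      rw [PySem.List.pyRange_neg_one_cons (by norm_num),
          show (0:Int) - 1 = -1 by norm_num,
          PySem.List.pyRange_neg_one_eq_nil (le_refl _)]
      simp only [List.foldl_cons, List.foldl_nil]
      rw [pvAStep]
      simp only [Int.toNat_zero, pow_zero]
      rw [PySem.Int.floordiv_eq_ediv_of_pos (by norm_num)]
      by_cases h0 : m = 0
      · subst h0; simp [pvDigits_nonpos]
      · have hm1 : (1:Int) ≤ m := by omega
        have : m / 1 = m := Int.ediv_one m
        rw [this, if_neg h0]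
        have hdig : pvDigits m = [m] := by
          rw [pvDigits]
          simp only [show ¬ (m ≤ 0) by omega, dite_false]
          have hmod : m % 10 = m := by omega
          have hdiv : m / 10 = 0 := by omega
          rw [if_neg (by omega), hmod, hdiv, pvDigits_nonpos (le_refl 0)]
        simp [hdig]
  | succ k ih =>
      intro L m hm hmk
      have hP : (0:Int) < 10 ^ (k+1) := by positivity
      rw [PySem.List.pyRange_neg_one_cons (by push_cast; omega)]
      have hcast : ((k+1 : Nat) : Int) - 1 = (k : Int) := by push_cast; ring
      rw [hcast]
      simp only [List.foldl_cons]
      rw [pvAStep]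
      have htn : ((k+1 : Nat) : Int).toNat = k + 1 := by simp
      simp only [htn]
      rw [PySem.Int.floordiv_eq_ediv_of_pos hP]
      by_cases hc : m / 10 ^ (k+1) = 0
      · rw [if_pos hc]
        have hmlt : m < 10 ^ (k + 1) := by
          by_contra hcon
          have h1 : 1 ≤ m / 10 ^ (k+1) := (Int.le_ediv_iff_mul_le hP).mpr (by omega)
          omega
        exact ih L m hm hmlt
      · rw [if_neg hc]
        rw [PySem.Int.mod_eq_emod_of_pos hP]
        set d := m / 10 ^ (k+1) with hd
        set m' := m % 10 ^ (k+1) with hm'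
        have hmeq : m = d * 10 ^ (k+1) + m' := by
          have h := Int.mul_ediv_add_emod m (10 ^ (k+1))
          rw [hd, hm']; linarith
        have hm'0 : 0 ≤ m' := Int.emod_nonneg m (by positivity)
        have hm'lt : m' < 10 ^ (k+1) := Int.emod_lt_of_pos m hP
        have hd1 : 1 ≤ d := by
          have : 0 ≤ d := Int.ediv_nonneg hm (le_of_lt hP)
          omega
        have hd9 : d ≤ 9 := by
          by_contra hcon
          have : 10 ≤ d := by omega
          have : 10 * 10 ^ (k+1) ≤ m := by nlinarith
          have : (10:Int) ^ (k+2) = 10 * 10 ^ (k+1) := by ring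
          omega
        rw [ih (L ++ [d]) m' hm'0 hm'lt]
        rw [hmeq, pvDigits_shift (k+1) d m' hd1 hd9 hm'0 hm'lt]
        simp

-- A's first loop returns some (E - 1) with n < 10^E, given enough fuel
theorem pvFindE_ret (n : Int) (hn : 0 ≤ n) : ∀ (fuel e : Nat), n < 10 ^ (e + fuel) →
    ∃ E : Nat, pvA_findE n (fuel + 1) e = some ((E : Int) - 1) ∧ n < 10 ^ E ∧ e ≤ E := by
  intro fuel
  induction fuel with
  | zero =>
      intro e hlt
      refine ⟨e, ?_, by simpa using hlt, le_refl e⟩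
      rw [pvA_findE]
      have hpos : (0:Int) < 10 ^ e := by positivity
      have : PySem.Int.floordiv n (10 ^ e) = 0 := by
        rw [PySem.Int.floordiv_eq_ediv_of_pos hpos]
        exact Int.ediv_eq_zero_of_lt hn (by simpa using hlt)
      rw [if_neg (not_ne_iff.mpr this)]
  | succ fuel ih =>
      intro e hlt
      rw [pvA_findE]
      have hpos : (0:Int) < 10 ^ e := by positivity
      by_cases hsmall : n < 10 ^ e
      · have : PySem.Int.floordiv n (10 ^ e) = 0 := by
          rw [PySem.Int.floordiv_eq_ediv_of_pos hpos]
          exact Int.ediv_eq_zero_of_lt hn hsmall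
        refine ⟨e, ?_, hsmall, le_refl e⟩
        rw [if_neg (not_ne_iff.mpr this)]
      · have hge : 10 ^ e ≤ n := not_lt.mp hsmall
        have hne : PySem.Int.floordiv n (10 ^ e) ≠ 0 := by
          rw [PySem.Int.floordiv_eq_ediv_of_pos hpos]
          have : 1 ≤ n / 10 ^ e := Int.le_ediv_iff_mul_le hpos |>.mpr (by simpa using hge)
          omega
        rw [if_pos hne]
        obtain ⟨E, hret, hEb, hEe⟩ := ih (e + 1) (by
          have : e + 1 + fuel = e + (fuel + 1) := by ring
          rw [this]; exact hlt)
        exact ⟨E, hret, hEb, by omega⟩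

-- Horner fold = polynomial evaluation of the reversed list
theorem pvHorner (L : List Int) : ∀ (rev : Int),
    L.foldl (fun r d => r * 10 + d) rev = rev * 10 ^ L.length + pvPoly L.reverse := by
  induction L with
  | nil => intro rev; simp [pvPoly]
  | cons x t ih =>
      intro rev
      simp only [List.foldl_cons, List.reverse_cons, List.length_cons]
      rw [ih (rev * 10 + x), pvPoly_append]
      simp only [List.length_reverse]
      ring

-- B's loop computes the Horner fold of the nonzero digits
theorem pvBrev_eq : ∀ (fuel : Nat) (m rev : Int), 0 ≤ m → m.natAbs < fuel →
    pvB_rev fuel m rev = (pvDigits m).foldl (fun r d => r * 10 + d) rev := by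
  intro fuel
  induction fuel with
  | zero => intro m rev hm hf; omega
  | succ fuel ih =>
      intro m rev hm hf
      rw [pvB_rev]
      by_cases hpos : m > 0
      · rw [if_pos hpos]
        rw [PySem.Int.floordiv_eq_ediv_of_pos (by norm_num),
            PySem.Int.mod_eq_emod_of_pos (by norm_num)]
        have hfuel : (m / 10).natAbs < fuel := by omega
        rw [ih (m / 10) _ (by omega) hfuel]
        rw [pvDigits_pos (n := m) (by omega)]
        by_cases hr : m % 10 = 0
        · simp [hr]
        · simp [hr]
      · rw [if_neg hpos]
        have : m = 0 := by omega
        subst this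
        simp [pvDigits_nonpos (le_refl 0)]

-- A's summation loop over range(len(L)) evaluates pvPoly L
theorem pvSum_eq_poly (L : List Int) :
    (PySem.List.pyRange 0 (L.length) 1).foldl
      (fun revn ind => revn + PySem.List.pyGetD L ind 0 * 10 ^ ind.toNat) 0 = pvPoly L := by
  induction L using List.reverseRecOn with
  | nil => simp [PySem.List.pyRange_one_eq_nil, pvPoly]
  | append_singleton M x ih =>
      have hlen : ((M ++ [x]).length : Int) = (M.length : Int) + 1 := by simp
      rw [hlen, PySem.List.pyRange_one_succ_right (by positivity)]
      rw [List.foldl_append]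
      have hcongr : (PySem.List.pyRange 0 (M.length) 1).foldl
          (fun revn ind => revn + PySem.List.pyGetD (M ++ [x]) ind 0 * 10 ^ ind.toNat) 0
          = (PySem.List.pyRange 0 (M.length) 1).foldl
          (fun revn ind => revn + PySem.List.pyGetD M ind 0 * 10 ^ ind.toNat) 0 := by
        apply PySem.List.foldl_congr_mem
        intro a i hi
        have hmem := (PySem.List.mem_pyRange_one).mp hi
        have h0 : 0 ≤ i := hmem.1
        have hlt : i < (M.length : Int) := hmem.2
        have hget : PySem.List.pyGetD (M ++ [x]) i 0 = PySem.List.pyGetD M i 0 := by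
          rw [PySem.List.pyGetD_of_nonneg _ _ h0, PySem.List.pyGetD_of_nonneg _ _ h0]
          have hklt : i.toNat < M.length := by omega
          simp [List.getD, List.getElem?_append_left hklt]
        rw [hget]
      rw [hcongr, ih]
      simp only [List.foldl_cons, List.foldl_nil]
      have hget : PySem.List.pyGetD (M ++ [x]) (M.length : Int) 0 = x := by
        rw [PySem.List.pyGetD_of_nonneg _ _ (by positivity)]
        simp [List.getD]
      rw [hget, pvPoly_append]
      simp

-- n < 10 ^ (n.natAbs + 1) for 0 ≤ n
theorem pvSize (n : Int) (hn : 0 ≤ n) : n < 10 ^ (n.natAbs + 1) := by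
  have h1 : n.natAbs < 10 ^ n.natAbs := Nat.lt_pow_self (by norm_num)
  have h2 : (10:Nat) ^ n.natAbs ≤ 10 ^ (n.natAbs + 1) := Nat.pow_le_pow_right (by norm_num) (by omega)
  have : n = (n.natAbs : Int) := by omega
  rw [this]
  exact_mod_cast Nat.lt_of_lt_of_le h1 h2

-- ===== VERDICT (by name: the statement is the Claim_ definition above) =====
theorem smaller_after_reverse_spec : Claim_equal_smaller_after_reverse := by
  intro n _ hpre
  unfold Spec_smaller_after_reverse
  have hn : 0 ≤ n := hpre
  by_cases h0 : n = 0
  · subst h0; decide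
  · have hnpos : 0 < n := by omega
    -- the value of A's first loop
    have hsize : n < 10 ^ (0 + (n.natAbs + 1)) := by simpa using pvSize n hn
    obtain ⟨E, hret, hElt, _⟩ := pvFindE_ret n hn (n.natAbs + 1) 0 hsize
    have hE1 : 1 ≤ E := by
      by_contra hcon
      have : E = 0 := by omega
      subst this
      simp at hElt
      omega
    -- common value: pvPoly of the reversed nonzero-digit list
    set R := pvPoly (pvDigits n).reverse with hR
    -- A's side
    have hA : smaller_after_reverse n = if n < R then n else R := by
      unfold smaller_after_reverse
      rw [show n.natAbs + 2 = (n.natAbs + 1) + 1 by ring, hret]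
      have hcastE : ((E : Int) - 1) = ((E - 1 : Nat) : Int) := by push_cast [hE1]; ring
      rw [hcastE]
      have hfold := pvAfold (E - 1) [] n hn (by
        have : E - 1 + 1 = E := by omega
        rw [this]; exact hElt)
      simp only []
      rw [hfold]
      simp only [List.nil_append]
      rw [pvSum_eq_poly]
    -- B's side
    have hB : smaller_after_reverse_alt n = min n R := by
      unfold smaller_after_reverse_alt
      rw [pvBrev_eq (n.natAbs + 1) n 0 hn (by omega)]
      rw [pvHorner]
      simp [hR]
    rw [hA, hB]
    rcases lt_or_ge n R with h | h
    · rw [if_pos h, min_eq_left (le_of_lt h)]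
    · rw [if_neg (not_lt.mpr h), min_eq_right h]
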